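-- pv_equiv track=rewrite | github.com/alexandru-dinu/programming-challenges | advent-of-code/2025/1/solve.py | iterate2
-- ===== SOURCE A (Python) =====
-- def iterate2(xs: list[int]):
--     y = 50
--     res = 0
--     for x in xs:
--         assert 0 <= y < 100
--         w, y_ = divmod(y + x, 100)
--         res += (
--             # number of passes through 0
--             abs(w)
--             # account for false pass when starting from 0 and going L
--             - (y == 0 and x < 0)
--             # account for missing pass (w == 0) when reaching 0
--             + (y_ == 0 and x < 0)
--         )
--         y = y_
--
--     return res
-- ===== SOURCE B (Python) =====
-- def iterate2(xs: list[int]):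
--     # cumulative-position table + boundary-crossing pass instead of a mutable mod-100 state
--     c = [50]
--     t = 50
--     for x in xs:
--         t += x
--         c.append(t)
--     res = 0
--     for (p, q), x in zip(zip(c, c[1:]), xs):
--         res += abs(q // 100 - p // 100)
--         if p % 100 == 0 and x < 0:
--             res -= 1
--         if q % 100 == 0 and x < 0:
--             res += 1
--     return res
-- ===== Notes on version B (the rewrite author's own statement) =====
-- stated objective: alternative
-- what changed: Replaces the single mutable mod-100 accumulator with a precomputed unbounded cumulative-position table and a second pass over consecutive pairs counting floor(c/100) boundary crossings.
import Mathlib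
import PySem

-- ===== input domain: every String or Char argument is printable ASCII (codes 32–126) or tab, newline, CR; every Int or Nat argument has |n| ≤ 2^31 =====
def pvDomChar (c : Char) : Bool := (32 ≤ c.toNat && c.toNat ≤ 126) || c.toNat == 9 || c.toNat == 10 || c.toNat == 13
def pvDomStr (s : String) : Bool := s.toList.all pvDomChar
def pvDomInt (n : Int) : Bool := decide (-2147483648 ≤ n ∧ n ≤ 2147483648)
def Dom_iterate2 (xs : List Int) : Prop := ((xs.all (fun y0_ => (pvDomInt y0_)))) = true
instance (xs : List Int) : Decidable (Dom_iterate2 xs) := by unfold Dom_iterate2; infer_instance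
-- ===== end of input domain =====

-- B replaces A's mutable mod-100 state with a cumulative-position table plus a pair-scanning pass (alternative decomposition, same cost).

-- ===== PORT A =====
def iterate2 (xs : List Int) : Int :=
  (xs.foldl (fun (st : Int × Int) x =>
      let w := PySem.Int.floordiv (st.1 + x) 100
      let y2 := PySem.Int.mod (st.1 + x) 100
      (y2, st.2 + (|w| - (if st.1 == 0 && x < 0 then 1 else 0)
                       + (if y2 == 0 && x < 0 then 1 else 0)))) (50, 0)).2

-- ===== PORT B =====
def iterate2_alt (xs : List Int) : Int :=
  let c := (xs.foldl (fun (p : List Int × Int) x => (p.1 ++ [p.2 + x], p.2 + x)) ([50], 50)).1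
  ((c.zip (c.drop 1)).zip xs).foldl
    (fun r pqx =>
      let r1 := r + |PySem.Int.floordiv pqx.1.2 100 - PySem.Int.floordiv pqx.1.1 100|
      let r2 := if PySem.Int.mod pqx.1.1 100 == 0 && pqx.2 < 0 then r1 - 1 else r1
      if PySem.Int.mod pqx.1.2 100 == 0 && pqx.2 < 0 then r2 + 1 else r2) 0

-- ===== PRECONDITION & SPEC =====
def Spec_iterate2 (xs : List Int) (out : Int) : Prop := out = iterate2_alt xs
instance (xs : List Int) (out : Int) : Decidable (Spec_iterate2 xs out) := by unfold Spec_iterate2; infer_instance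

-- ===== CLAIM (what is proved, stated in full; the proofs are below) =====
def Claim_equal_iterate2 : Prop := ∀ (xs : List Int), Dom_iterate2 xs → Spec_iterate2 xs (iterate2 xs)

-- ===== LEMMAS AND PROOFS =====

-- reference recursion: crossing count walking from cumulative position s through xs
def pvBfold (xs : List Int) (s r : Int) : Int :=
  match xs with
  | [] => r
  | x :: t =>
      pvBfold t (s + x)
        (r + |PySem.Int.floordiv (s + x) 100 - PySem.Int.floordiv s 100|
           - (if PySem.Int.mod s 100 == 0 && x < 0 then 1 else 0)
           + (if PySem.Int.mod (s + x) 100 == 0 && x < 0 then 1 else 0))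

-- prefix list of cumulative positions
def pvPref (s : Int) (xs : List Int) : List Int :=
  match xs with
  | [] => [s]
  | x :: t => s :: pvPref (s + x) t

lemma pv_mod_shift (a k : Int) : PySem.Int.mod (a - 100 * k) 100 = PySem.Int.mod a 100 := by
  rw [PySem.Int.mod_eq_emod_of_pos (by norm_num), PySem.Int.mod_eq_emod_of_pos (by norm_num)]
  omega

lemma pv_fdiv_shift (a k : Int) : PySem.Int.floordiv (a - 100 * k) 100 = PySem.Int.floordiv a 100 - k := by
  rw [PySem.Int.floordiv_eq_ediv_of_pos (by norm_num), PySem.Int.floordiv_eq_ediv_of_pos (by norm_num)]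
  omega

lemma pv_A_general (xs : List Int) : ∀ (s r : Int),
    (xs.foldl (fun (st : Int × Int) x =>
      let w := PySem.Int.floordiv (st.1 + x) 100
      let y2 := PySem.Int.mod (st.1 + x) 100
      (y2, st.2 + (|w| - (if st.1 == 0 && x < 0 then 1 else 0)
                       + (if y2 == 0 && x < 0 then 1 else 0)))) (PySem.Int.mod s 100, r)).2
    = pvBfold xs s r := by
  induction xs with
  | nil => intro s r; simp [pvBfold]
  | cons x t ih =>
    intro s r
    have hm : PySem.Int.mod s 100 + x = (s + x) - 100 * PySem.Int.floordiv s 100 := by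
      have := PySem.Int.floordiv_mul_add_mod s 100
      omega
    simp only [List.foldl_cons]
    rw [hm, pv_mod_shift, pv_fdiv_shift, ih (s + x)]
    show pvBfold t (s + x) _ = pvBfold (x :: t) s r
    simp only [pvBfold]
    congr 1
    ring

def pvBuildStep : List Int × Int → Int → List Int × Int :=
  fun p x => (p.1 ++ [p.2 + x], p.2 + x)

lemma pv_build (xs : List Int) : ∀ (acc : List Int) (s : Int),
    (xs.foldl pvBuildStep (acc ++ [s], s)).1 = acc ++ pvPref s xs := by
  induction xs with
  | nil => intro acc s; simp [pvPref]
  | cons x t ih =>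
    intro acc s
    simp only [List.foldl_cons, pvBuildStep, pvPref]
    have := ih (acc ++ [s]) (s + x)
    simpa using this

def pvZStep : Int → (Int × Int) × Int → Int :=
  fun r pqx =>
    let r1 := r + |PySem.Int.floordiv pqx.1.2 100 - PySem.Int.floordiv pqx.1.1 100|
    let r2 := if PySem.Int.mod pqx.1.1 100 == 0 && pqx.2 < 0 then r1 - 1 else r1
    if PySem.Int.mod pqx.1.2 100 == 0 && pqx.2 < 0 then r2 + 1 else r2

lemma pv_zstep_eq (r s q x : Int) :
    pvZStep r ((s, q), x)
    = r + |PySem.Int.floordiv q 100 - PySem.Int.floordiv s 100|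
        - (if PySem.Int.mod s 100 == 0 && x < 0 then 1 else 0)
        + (if PySem.Int.mod q 100 == 0 && x < 0 then 1 else 0) := by
  simp only [pvZStep]
  split_ifs <;> ring

lemma pv_zip_fold (xs : List Int) : ∀ (s r : Int),
    (((pvPref s xs).zip ((pvPref s xs).drop 1)).zip xs).foldl pvZStep r = pvBfold xs s r := by
  induction xs with
  | nil => intro s r; simp [pvPref, pvBfold]
  | cons x t ih =>
    intro s r
    cases t with
    | nil =>
      simp only [pvPref, pvBfold, List.drop_succ_cons, List.drop_zero, List.zip_cons_cons,
        List.zip_nil_right, List.foldl_cons, List.foldl_nil]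
      exact pv_zstep_eq r s (s + x) x
    | cons y t' =>
      have ihx := ih (s + x) (pvZStep r ((s, s + x), x))
      simp only [pvPref, List.drop_succ_cons, List.drop_zero] at ihx ⊢
      simp only [List.zip_cons_cons, List.foldl_cons] at ihx ⊢
      rw [ihx]
      show pvBfold (y :: t') (s + x) _ = pvBfold (x :: y :: t') s r
      rw [pv_zstep_eq]
      rfl

-- ===== VERDICT (by name: the statement is the Claim_ definition above) =====
theorem iterate2_spec : Claim_equal_iterate2 := by
  intro xs _
  show iterate2 xs = iterate2_alt xs
  have h1 : iterate2 xs = pvBfold xs 50 0 := by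
    unfold iterate2
    conv_lhs => rw [show (50 : Int) = PySem.Int.mod 50 100 from by decide]
    exact pv_A_general xs 50 0
  have hb : (xs.foldl (fun (p : List Int × Int) x => (p.1 ++ [p.2 + x], p.2 + x)) ([50], 50)).1
      = pvPref 50 xs := by
    simpa using pv_build xs [] 50
  have h2 : iterate2_alt xs = pvBfold xs 50 0 := by
    unfold iterate2_alt
    simp only [hb]
    exact pv_zip_fold xs 50 0
  rw [h1, h2]
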